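-- pv_equiv track=rewrite | github.com/afzalsiddique/problem-solving | Problem_Solving_Python/Miscellaneous/moutain_scenes.py | count_mountain_scenes
-- ===== SOURCE A (Python) =====
-- def count_mountain_scenes(N, WIDTH, HEIGHT):
--     MOD = 1_000_000_007
--     ribbon_squares = min(HEIGHT * WIDTH, N)
--     dp = [[-1] * (ribbon_squares + 1) for _ in range(WIDTH + 1)]  # -1 means null
--     no_of_plains = ribbon_squares // WIDTH + 1
--
--     def f(width, ribbon):
--         if ribbon < 0:
--             return 0
--         if width > WIDTH:
--             return 1
--         if dp[width][ribbon] != -1:  # not null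
--             return dp[width][ribbon]
--         count = 0
--         for height in range(HEIGHT + 1):
--             count += f(width + 1, ribbon - height)
--         dp[width][ribbon] = count % MOD
--         return dp[width][ribbon]
--
--     ans = ((f(1, ribbon_squares) - no_of_plains) + MOD) % MOD
--     return int(ans)
-- ===== SOURCE B (Python) =====
-- def count_mountain_scenes(N, WIDTH, HEIGHT):
--     MOD = 1_000_000_007
--     R = min(HEIGHT * WIDTH, N)
--     plains = R // WIDTH + 1
--     if R < 0:
--         total = 0
--     else:
--         # ways[r] = number of scenes of the columns processed so far using exactly r squares (mod MOD)
--         ways = [1] + [0] * R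
--         for _ in range(WIDTH):
--             pref = [0] * (R + 2)
--             for r in range(R + 1):
--                 pref[r + 1] = (pref[r] + ways[r]) % MOD
--             ways = [(pref[r + 1] - pref[max(r - HEIGHT, 0)]) % MOD for r in range(R + 1)]
--         total = sum(ways) % MOD
--     return (total - plains) % MOD
-- ===== Notes on version B (the rewrite author's own statement) =====
-- stated objective: faster
-- what changed: Replaces A's top-down memoized recursion (summing HEIGHT+1 subproblems per cell) by a bottom-up exact-area DP whose inner convolution over heights is collapsed to O(1) per cell via prefix sums (sliding window), removing the height factor.
import Mathlib
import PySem

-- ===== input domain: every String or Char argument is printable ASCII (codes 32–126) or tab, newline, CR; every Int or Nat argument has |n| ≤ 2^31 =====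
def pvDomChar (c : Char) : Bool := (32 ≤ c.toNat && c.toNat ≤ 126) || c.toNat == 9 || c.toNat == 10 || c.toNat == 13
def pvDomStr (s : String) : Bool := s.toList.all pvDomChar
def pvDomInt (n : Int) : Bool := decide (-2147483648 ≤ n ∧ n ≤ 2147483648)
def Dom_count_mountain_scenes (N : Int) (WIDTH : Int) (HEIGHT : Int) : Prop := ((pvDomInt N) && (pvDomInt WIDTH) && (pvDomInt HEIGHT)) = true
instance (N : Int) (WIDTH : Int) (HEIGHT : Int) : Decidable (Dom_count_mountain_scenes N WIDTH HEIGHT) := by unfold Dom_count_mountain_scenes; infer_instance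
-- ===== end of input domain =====

-- B replaces A's memoized recursion (an O(HEIGHT) inner sum per table cell) by a bottom-up
-- exact-area DP whose height convolution is done with prefix sums, one O(1) window per cell.

-- ===== PORT A =====
-- 2-D memo accesses; on the executions A performs the indices are always in range,
-- so the getD defaults / the out-of-range no-op of set are never exercised.
def pvGet2 (dp : List (List Int)) (i j : Int) : Int :=
  (dp.getD i.toNat []).getD j.toNat (-1)

def pvSet2 (dp : List (List Int)) (i j : Int) (v : Int) : List (List Int) :=
  dp.modify i.toNat (fun row => row.set j.toNat v)

-- Python's inner `f` (recursion depth is at most WIDTH+1-width, so the fuel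
-- `WIDTH.toNat` supplied by `count_mountain_scenes` below never runs out)
def countA_f (WIDTH HEIGHT MOD : Int) (fuel : Nat) (width ribbon : Int)
    (dp : List (List Int)) : Int × List (List Int) :=
  if ribbon < 0 then (0, dp)
  else if width > WIDTH then (1, dp)
  else
    match fuel with
    | 0 => (0, dp)  -- never reached: fuel > WIDTH - width whenever width ≤ WIDTH
    | Nat.succ fuel' =>
      if pvGet2 dp width ribbon ≠ -1 then (pvGet2 dp width ribbon, dp)
      else
        let p := (PySem.List.pyRange 0 (HEIGHT + 1) 1).foldl
          (fun (s : Int × List (List Int)) h =>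
            let t := countA_f WIDTH HEIGHT MOD fuel' (width + 1) (ribbon - h) s.2
            (s.1 + t.1, t.2)) (0, dp)
        let v := PySem.Int.mod p.1 MOD
        (v, pvSet2 p.2 width ribbon v)

def count_mountain_scenes (N : Int) (WIDTH : Int) (HEIGHT : Int) : Int :=
  let MOD : Int := 1000000007
  let ribbon_squares := min (HEIGHT * WIDTH) N
  let dp := List.replicate (WIDTH + 1).toNat (List.replicate (ribbon_squares + 1).toNat (-1))
  let no_of_plains := PySem.Int.floordiv ribbon_squares WIDTH + 1
  PySem.Int.mod ((countA_f WIDTH HEIGHT MOD WIDTH.toNat 1 ribbon_squares dp).1 - no_of_plains + MOD) MOD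

-- ===== PORT B =====
-- the inner `for r in range(R+1): pref[r+1] = (pref[r] + ways[r]) % MOD` loop
def pvPrefAux (MOD : Int) : List Int → Int → List Int
  | [], _ => []
  | w :: ws, acc =>
    let acc' := PySem.Int.mod (acc + w) MOD
    acc' :: pvPrefAux MOD ws acc'

-- one pass of B's width loop: prefix sums, then the sliding-window differences
def pvStep (MOD HEIGHT : Int) (n : Nat) (ways : List Int) : List Int :=
  let pref := 0 :: pvPrefAux MOD ways 0
  (List.range (n + 1)).map (fun r =>
    PySem.Int.mod (pref.getD (r + 1) 0 - pref.getD (max ((r : Int) - HEIGHT) 0).toNat 0) MOD)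

def count_mountain_scenes_alt (N : Int) (WIDTH : Int) (HEIGHT : Int) : Int :=
  let MOD : Int := 1000000007
  let R := min (HEIGHT * WIDTH) N
  let plains := PySem.Int.floordiv R WIDTH + 1
  let total :=
    if R < 0 then 0
    else
      let ways := (List.range WIDTH.toNat).foldl
        (fun ways _ => pvStep MOD HEIGHT R.toNat ways) (1 :: List.replicate R.toNat 0)
      PySem.Int.mod ways.sum MOD
  PySem.Int.mod (total - plains) MOD

-- ===== PRECONDITION & SPEC =====
-- Pre_ excludes exactly WIDTH = 0, where A raises ZeroDivisionError on `ribbon_squares // WIDTH`.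
def Pre_count_mountain_scenes (N : Int) (WIDTH : Int) (HEIGHT : Int) : Prop := WIDTH ≠ 0
instance (N : Int) (WIDTH : Int) (HEIGHT : Int) : Decidable (Pre_count_mountain_scenes N WIDTH HEIGHT) := by unfold Pre_count_mountain_scenes; infer_instance

def pvWitness_count_mountain_scenes : Int × Int × Int := (5, 2, 3)

def Spec_count_mountain_scenes (N : Int) (WIDTH : Int) (HEIGHT : Int) (out : Int) : Prop := out = count_mountain_scenes_alt N WIDTH HEIGHT
instance (N : Int) (WIDTH : Int) (HEIGHT : Int) (out : Int) : Decidable (Spec_count_mountain_scenes N WIDTH HEIGHT out) := by unfold Spec_count_mountain_scenes; infer_instance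

-- ===== CLAIM (what is proved, stated in full; the proofs are below) =====
def Claim_equal_count_mountain_scenes : Prop := ∀ (N : Int) (WIDTH : Int) (HEIGHT : Int), Dom_count_mountain_scenes N WIDTH HEIGHT → Pre_count_mountain_scenes N WIDTH HEIGHT → Spec_count_mountain_scenes N WIDTH HEIGHT (count_mountain_scenes N WIDTH HEIGHT)

-- ===== LEMMAS AND PROOFS =====

-- exact number (below, `CC`: its running total ≤ r; `G`: that total mod 10^9+7) of
-- height sequences of length k with entries in [0, HEIGHT] and area exactly r
def eC (H : Int) : Nat → Int → Int
  | 0, r => if r = 0 then 1 else 0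
  | k + 1, r => ∑ h ∈ Finset.range (H + 1).toNat, eC H k (r - (h : Int))

def CC (H : Int) (k : Nat) (r : Int) : Int :=
  if 0 ≤ r then ∑ s ∈ Finset.range (r.toNat + 1), eC H k (s : Int) else 0

def G (H : Int) (k : Nat) (r : Int) : Int := PySem.Int.mod (CC H k r) 1000000007

lemma sum_range_list (n : Nat) (f : Nat → Int) :
    ∑ i ∈ Finset.range n, f i = ((List.range n).map f).sum := by
  induction n with
  | zero => simp
  | succ n ih => rw [Finset.sum_range_succ, List.range_succ]; simp [ih]

lemma eC_neg (H : Int) : ∀ (k : Nat) (r : Int), r < 0 → eC H k r = 0 := by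
  intro k
  induction k with
  | zero => intro r hr; simp [eC, show r ≠ 0 by omega]
  | succ k ih =>
    intro r hr
    simp only [eC]
    refine Finset.sum_eq_zero ?_
    intro h _
    exact ih _ (by omega)

lemma CC_neg (H : Int) (k : Nat) (r : Int) (h : r < 0) : CC H k r = 0 := by
  simp [CC, show ¬ (0 ≤ r) by omega]

lemma CC_succ (H : Int) (k : Nat) (r : Int) : CC H k r = CC H k (r - 1) + eC H k r := by
  rcases lt_trichotomy r 0 with h | h | h
  · rw [CC_neg H k r h, CC_neg H k (r - 1) (by omega), eC_neg H k r h]; ring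
  · subst h
    rw [CC_neg H k (0 - 1) (by omega)]
    simp [CC]
  · have h0 : (0 : Int) ≤ r := by omega
    have h1 : (0 : Int) ≤ r - 1 := by omega
    rw [CC, CC, if_pos h0, if_pos h1]
    have ht : r.toNat = (r - 1).toNat + 1 := by omega
    rw [ht, Finset.sum_range_succ]
    have : (((r - 1).toNat + 1 : Nat) : Int) = r := by omega
    rw [this]

lemma sum_shift (H : Int) (k : Nat) (r : Int) :
    ∀ (n : Nat), ∑ h ∈ Finset.range n, eC H k (r - (h : Int)) = CC H k r - CC H k (r - (n : Int)) := by
  intro n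
  induction n with
  | zero => simp
  | succ n ih =>
    rw [Finset.sum_range_succ, ih, CC_succ H k (r - (n : Int))]
    have : r - ((n : Int) + 1) = r - (n : Int) - 1 := by ring
    push_cast
    rw [this]
    ring

lemma CC_conv (H : Int) (k : Nat) (r : Int) :
    CC H (k + 1) r = ∑ h ∈ Finset.range (H + 1).toNat, CC H k (r - (h : Int)) := by
  rcases lt_or_ge r 0 with h | h
  · rw [CC_neg H (k + 1) r h]
    refine (Finset.sum_eq_zero ?_).symm
    intro x _
    exact CC_neg H k _ (by omega)
  · obtain ⟨m, rfl⟩ : ∃ m : Nat, r = (m : Int) := ⟨r.toNat, by omega⟩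
    clear h
    induction m with
    | zero =>
      rw [show ((0 : Nat) : Int) = 0 from rfl, CC_succ H (k + 1) 0, CC_neg H (k + 1) (0 - 1) (by omega)]
      simp only [eC, zero_add]
      refine Finset.sum_congr rfl ?_
      intro h _
      rw [CC_succ H k (0 - (h : Int)), CC_neg H k (0 - (h : Int) - 1) (by omega), zero_add]
    | succ m ih =>
      have hc : ((m + 1 : Nat) : Int) = (m : Int) + 1 := by push_cast; ring
      rw [hc, CC_succ H (k + 1) ((m : Int) + 1)]
      have h1 : (m : Int) + 1 - 1 = (m : Int) := by ring
      rw [h1, ih]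
      have h2 : eC H (k + 1) ((m : Int) + 1)
          = ∑ h ∈ Finset.range (H + 1).toNat, eC H k ((m : Int) + 1 - (h : Int)) := rfl
      rw [h2, ← Finset.sum_add_distrib]
      refine Finset.sum_congr rfl ?_
      intro h _
      rw [CC_succ H k ((m : Int) + 1 - (h : Int))]
      have : (m : Int) + 1 - (h : Int) - 1 = (m : Int) - (h : Int) := by ring
      rw [this]

lemma CC_zero (H : Int) (r : Int) (h : 0 ≤ r) : CC H 0 r = 1 := by
  rw [CC, if_pos h]
  rw [show (fun s : Nat => eC H 0 (s : Int)) = fun s : Nat => if s = 0 then 1 else 0 by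
    funext s; simp [eC]]
  simp

lemma G_neg (H : Int) (k : Nat) (r : Int) (h : r < 0) : G H k r = 0 := by
  rw [G, CC_neg H k r h, PySem.Int.mod_eq_emod_of_pos (by norm_num), Int.zero_emod]

lemma G_zero (H : Int) (r : Int) (h : 0 ≤ r) : G H 0 r = 1 := by
  rw [G, CC_zero H r h, PySem.Int.mod_eq_emod_of_pos (by norm_num)]
  rw [Int.emod_eq_of_lt (by norm_num) (by norm_num)]

lemma G_step (H : Int) (k : Nat) (r : Int) (hr : 0 ≤ r) :
    PySem.Int.mod (∑ h ∈ Finset.range (H + 1).toNat, G H k (r - (h : Int))) 1000000007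
      = G H (k + 1) r := by
  have hM : (0 : Int) < 1000000007 := by norm_num
  rw [G, PySem.Int.mod_eq_emod_of_pos hM, PySem.Int.mod_eq_emod_of_pos hM]
  rw [show (fun h : Nat => G H k (r - (h : Int)))
      = fun h : Nat => CC H k (r - (h : Int)) % 1000000007 by
    funext h; rw [G, PySem.Int.mod_eq_emod_of_pos hM]]
  rw [← Finset.sum_int_mod, CC_conv H k r]

-- ---- A side ----

def InvA (WIDTH HEIGHT : Int) (dp : List (List Int)) : Prop :=
  ∀ (w r : Int), 0 ≤ w → 0 ≤ r → pvGet2 dp w r ≠ -1 →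
    pvGet2 dp w r = G HEIGHT (WIDTH + 1 - w).toNat r

lemma pvGet2_replicate (a b : Nat) (w r : Int) :
    pvGet2 (List.replicate a (List.replicate b (-1))) w r = -1 := by
  by_cases h : w.toNat < a <;> by_cases h2 : r.toNat < b <;>
    simp [pvGet2, List.getD_eq_getElem?_getD, List.getElem?_replicate, h, h2]

lemma pvGet2_pvSet2 (dp : List (List Int)) (i j w r v : Int)
    (hi : 0 ≤ i) (hj : 0 ≤ j) (hw : 0 ≤ w) (hr : 0 ≤ r) :
    (pvGet2 (pvSet2 dp i j v) w r = v ∧ w = i ∧ r = j) ∨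
      pvGet2 (pvSet2 dp i j v) w r = pvGet2 dp w r := by
  rw [pvGet2, pvGet2, pvSet2]
  simp only [List.getD_eq_getElem?_getD, List.getElem?_modify]
  cases hdp : dp[w.toNat]? with
  | none => right; rfl
  | some row =>
    simp only [Option.map_eq_map, Option.map_some, Option.getD_some]
    by_cases hwi : i.toNat = w.toNat
    · have hwi' : w = i := by omega
      simp only [if_pos hwi]
      rw [List.getElem?_set]
      by_cases hrj : j.toNat = r.toNat
      · by_cases hlen : j.toNat < row.length
        · exact Or.inl ⟨by simp [if_pos hrj, if_pos hlen], by omega, by omega⟩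
        · right
          simp only [if_pos hrj, if_neg hlen]
          rw [List.getElem?_eq_none (by omega : row.length ≤ r.toNat)]
          all_goals rfl
      · right
        simp only [if_neg hrj]
        all_goals rfl
    · right
      simp only [if_neg hwi]
      all_goals rfl

lemma countA_f_spec (WIDTH HEIGHT : Int) (hH : 0 ≤ HEIGHT) :
    ∀ (fuel : Nat) (width ribbon : Int) (dp : List (List Int)),
      1 ≤ width → WIDTH < width + (fuel : Int) → InvA WIDTH HEIGHT dp →
      (countA_f WIDTH HEIGHT 1000000007 fuel width ribbon dp).1
          = G HEIGHT (WIDTH + 1 - width).toNat ribbon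
        ∧ InvA WIDTH HEIGHT (countA_f WIDTH HEIGHT 1000000007 fuel width ribbon dp).2 := by
  intro fuel
  induction fuel with
  | zero =>
    intro width ribbon dp hw hfuel hinv
    rw [countA_f]
    by_cases hr : ribbon < 0
    · rw [if_pos hr]; exact ⟨(G_neg _ _ _ hr).symm, hinv⟩
    · have hwW : width > WIDTH := by push_cast at hfuel; omega
      rw [if_neg hr, if_pos hwW]
      have h0 : (WIDTH + 1 - width).toNat = 0 := by omega
      rw [h0]
      exact ⟨(G_zero _ _ (by omega)).symm, hinv⟩
  | succ fuel ih =>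
    intro width ribbon dp hw hfuel hinv
    rw [countA_f]
    by_cases hr : ribbon < 0
    · rw [if_pos hr]; exact ⟨(G_neg _ _ _ hr).symm, hinv⟩
    · rw [if_neg hr]
      by_cases hwW : width > WIDTH
      · rw [if_pos hwW]
        have h0 : (WIDTH + 1 - width).toNat = 0 := by omega
        rw [h0]
        exact ⟨(G_zero _ _ (by omega)).symm, hinv⟩
      · rw [if_neg hwW]
        dsimp only
        by_cases hmemo : pvGet2 dp width ribbon ≠ -1
        · rw [if_pos hmemo]
          exact ⟨hinv width ribbon (by omega) (by omega) hmemo, hinv⟩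
        · rw [if_neg hmemo]
          have hfold : ∀ (hs : List Int) (c : Int) (dp' : List (List Int)), InvA WIDTH HEIGHT dp' →
              (hs.foldl (fun (s : Int × List (List Int)) h =>
                  let t := countA_f WIDTH HEIGHT 1000000007 fuel (width + 1) (ribbon - h) s.2
                  (s.1 + t.1, t.2)) (c, dp')).1
                = c + (hs.map (fun h => G HEIGHT (WIDTH - width).toNat (ribbon - h))).sum
              ∧ InvA WIDTH HEIGHT ((hs.foldl (fun (s : Int × List (List Int)) h =>
                  let t := countA_f WIDTH HEIGHT 1000000007 fuel (width + 1) (ribbon - h) s.2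
                  (s.1 + t.1, t.2)) (c, dp')).2) := by
            intro hs
            induction hs with
            | nil => intro c dp' hi; exact ⟨by simp, hi⟩
            | cons x xs iht =>
              intro c dp' hi
              obtain ⟨h1, h2⟩ := ih (width + 1) (ribbon - x) dp' (by omega) (by push_cast at hfuel ⊢; omega) hi
              have hk : (WIDTH + 1 - (width + 1)).toNat = (WIDTH - width).toNat := by omega
              simp only [List.foldl_cons, List.map_cons, List.sum_cons]
              obtain ⟨h3, h4⟩ := iht
                (c + (countA_f WIDTH HEIGHT 1000000007 fuel (width + 1) (ribbon - x) dp').1)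
                (countA_f WIDTH HEIGHT 1000000007 fuel (width + 1) (ribbon - x) dp').2 h2
              refine ⟨?_, h4⟩
              rw [h3, h1, hk]
              ring
          obtain ⟨hp1, hp2⟩ := hfold (PySem.List.pyRange 0 (HEIGHT + 1) 1) 0 dp hinv
          have hksucc : (WIDTH + 1 - width).toNat = (WIDTH - width).toNat + 1 := by omega
          have hsum : (PySem.List.pyRange 0 (HEIGHT + 1) 1).map
                (fun h => G HEIGHT (WIDTH - width).toNat (ribbon - h))
              = (List.range (HEIGHT + 1).toNat).map
                (fun k : Nat => G HEIGHT (WIDTH - width).toNat (ribbon - (k : Int))) := by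
            rw [PySem.List.pyRange_one, List.map_map]
            simp
          have hval : PySem.Int.mod (0 + ((PySem.List.pyRange 0 (HEIGHT + 1) 1).map
                (fun h => G HEIGHT (WIDTH - width).toNat (ribbon - h))).sum) 1000000007
              = G HEIGHT (WIDTH + 1 - width).toNat ribbon := by
            rw [hksucc, hsum, zero_add, ← sum_range_list, G_step HEIGHT _ ribbon (by omega)]
          refine ⟨by rw [← hp1] at hval; exact hval, ?_⟩
          intro w r hw0 hr0 hne
          rcases pvGet2_pvSet2 _ width ribbon w r _ (by omega) (by omega) hw0 hr0 with ⟨hv, hwi, hri⟩ | heq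
          · rw [hv, hwi, hri]
            rw [← hp1] at hval
            exact hval
          · rw [heq]
            rw [heq] at hne
            exact hp2 w r hw0 hr0 hne

-- ---- B side ----

def waysVec (H : Int) (k n : Nat) : List Int :=
  (List.range (n + 1)).map (fun s : Nat => PySem.Int.mod (eC H k (s : Int)) 1000000007)

lemma ways0_eq (H : Int) (n : Nat) : (1 : Int) :: List.replicate n 0 = waysVec H 0 n := by
  rw [waysVec, List.range_succ_eq_map, List.map_cons, List.map_map]
  have h0 : PySem.Int.mod (eC H 0 ((0 : Nat) : Int)) 1000000007 = 1 := by
    rw [PySem.Int.mod_eq_emod_of_pos (by norm_num)]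
    simp [eC]
  have h1 : (fun s : Nat => PySem.Int.mod (eC H 0 (s : Int)) 1000000007) ∘ Nat.succ
      = fun _ : Nat => (0 : Int) := by
    funext s
    have hne : ((s : Int) + 1) ≠ 0 := by omega
    simp [Function.comp, eC, hne, PySem.Int.mod_eq_emod_of_pos (by norm_num : (0:Int) < 1000000007)]
  rw [h0, h1, List.map_const']
  simp

lemma pvPrefAux_getD (M : Int) (hM : 0 < M) :
    ∀ (l : List Int) (acc : Int) (i : Nat), i < l.length →
      (pvPrefAux M l acc).getD i 0
        = PySem.Int.mod (acc + ∑ j ∈ Finset.range (i + 1), l.getD j 0) M := by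
  intro l
  induction l with
  | nil => intro acc i h; simp at h
  | cons w ws ihl =>
    intro acc i h
    cases i with
    | zero =>
      simp [pvPrefAux]
    | succ i =>
      have hi : i < ws.length := by simpa using h
      simp only [pvPrefAux, List.getD_cons_succ]
      rw [ihl _ i hi]
      have hsum : ∑ j ∈ Finset.range (i + 1 + 1), (w :: ws).getD j 0
          = w + ∑ j ∈ Finset.range (i + 1), ws.getD j 0 := by
        rw [Finset.sum_range_succ']
        simp only [List.getD_cons_succ, List.getD_cons_zero]
        ring
      rw [hsum, PySem.Int.mod_eq_emod_of_pos hM, PySem.Int.mod_eq_emod_of_pos hM,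
        PySem.Int.mod_eq_emod_of_pos hM, Int.emod_add_emod]
      congr 1
      ring

lemma pref_getD (H : Int) (k n i : Nat) (hi : i ≤ n + 1) :
    ((0 : Int) :: pvPrefAux 1000000007 (waysVec H k n) 0).getD i 0 = G H k ((i : Int) - 1) := by
  cases i with
  | zero =>
    rw [List.getD_cons_zero, G_neg H k _ (by omega)]
  | succ i =>
    have hlen : i < (waysVec H k n).length := by
      rw [waysVec, List.length_map, List.length_range]
      omega
    rw [List.getD_cons_succ, pvPrefAux_getD 1000000007 (by norm_num) _ 0 i hlen, zero_add]
    have hgd : ∀ j ∈ Finset.range (i + 1), (waysVec H k n).getD j 0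
        = PySem.Int.mod (eC H k (j : Int)) 1000000007 := by
      intro j hj
      simp only [Finset.mem_range] at hj
      simp only [waysVec]
      exact PySem.List.getD_map_range _ (n + 1) j 0 (by omega)
    rw [Finset.sum_congr rfl hgd, G]
    rw [PySem.Int.mod_eq_emod_of_pos (by norm_num), PySem.Int.mod_eq_emod_of_pos (by norm_num)]
    rw [show (fun j : Nat => PySem.Int.mod (eC H k (j : Int)) 1000000007)
        = fun j : Nat => eC H k (j : Int) % 1000000007 by
      funext j; rw [PySem.Int.mod_eq_emod_of_pos (by norm_num)]]
    rw [← Finset.sum_int_mod]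
    have h2 : ((((i + 1 : Nat) : Int)) - 1).toNat = i := by omega
    have : CC H k (((i + 1 : Nat) : Int) - 1) = ∑ j ∈ Finset.range (i + 1), eC H k (j : Int) := by
      rw [CC, if_pos (by omega : (0:Int) ≤ ((i + 1 : Nat) : Int) - 1), h2]
    rw [this]

lemma pvStep_waysVec (H : Int) (hH : 0 ≤ H) (k n : Nat) :
    pvStep 1000000007 H n (waysVec H k n) = waysVec H (k + 1) n := by
  have hMpos : (0 : Int) < 1000000007 := by norm_num
  rw [pvStep]
  rw [show waysVec H (k + 1) n
      = (List.range (n + 1)).map (fun s : Nat => PySem.Int.mod (eC H (k + 1) (s : Int)) 1000000007)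
    from rfl]
  refine List.map_congr_left ?_
  intro r hr
  simp only [List.mem_range] at hr
  have hmle : (max ((r : Int) - H) 0).toNat ≤ n + 1 := by omega
  have hr1 : r + 1 ≤ n + 1 := by omega
  rw [pref_getD H k n (r + 1) hr1, pref_getD H k n _ hmle]
  have e1 : ((r + 1 : Nat) : Int) - 1 = (r : Int) := by push_cast; ring
  rw [e1]
  have e2 : CC H k (((max ((r : Int) - H) 0).toNat : Int) - 1) = CC H k ((r : Int) - H - 1) := by
    rcases le_or_gt 0 ((r : Int) - H) with h | h
    · have hm : ((max ((r : Int) - H) 0).toNat : Int) - 1 = (r : Int) - H - 1 := by omega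
      rw [hm]
    · have hm : ((max ((r : Int) - H) 0).toNat : Int) - 1 = -1 := by omega
      rw [hm, CC_neg H k _ (by omega), CC_neg H k _ (by omega)]
  have e3 : eC H (k + 1) (r : Int) = CC H k (r : Int) - CC H k ((r : Int) - H - 1) := by
    rw [show eC H (k + 1) (r : Int)
        = ∑ h ∈ Finset.range (H + 1).toNat, eC H k ((r : Int) - (h : Int)) from rfl]
    rw [sum_shift H k (r : Int) (H + 1).toNat]
    have : ((((H + 1).toNat : Nat)) : Int) = H + 1 := by omega
    rw [this]
    ring_nf
  rw [G, G, e2, e3]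
  rw [PySem.Int.mod_eq_emod_of_pos hMpos, PySem.Int.mod_eq_emod_of_pos hMpos,
    PySem.Int.mod_eq_emod_of_pos hMpos, PySem.Int.mod_eq_emod_of_pos hMpos]
  rw [← Int.sub_emod]

lemma fold_ways (H : Int) (hH : 0 ≤ H) (n : Nat) :
    ∀ (W : Nat), (List.range W).foldl (fun ways _ => pvStep 1000000007 H n ways)
        (waysVec H 0 n) = waysVec H W n := by
  intro W
  induction W with
  | zero => simp
  | succ W ihW =>
    rw [List.range_succ, List.foldl_append, ihW, List.foldl_cons, List.foldl_nil,
      pvStep_waysVec H hH W n]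

lemma sum_waysVec (H : Int) (W n : Nat) :
    PySem.Int.mod (waysVec H W n).sum 1000000007 = G H W ((n : Int)) := by
  have hMpos : (0 : Int) < 1000000007 := by norm_num
  rw [waysVec, G, PySem.Int.mod_eq_emod_of_pos hMpos, PySem.Int.mod_eq_emod_of_pos hMpos]
  rw [show (fun s : Nat => PySem.Int.mod (eC H W (s : Int)) 1000000007)
      = fun s : Nat => eC H W (s : Int) % 1000000007 by
    funext s; rw [PySem.Int.mod_eq_emod_of_pos hMpos]]
  rw [← sum_range_list, ← Finset.sum_int_mod]
  rw [CC, if_pos (by omega : (0 : Int) ≤ (n : Int))]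
  have : ((n : Int)).toNat = n := by omega
  rw [this]

-- ===== VERDICT (by name: the statement is the Claim_ definition above) =====
theorem count_mountain_scenes_spec : Claim_equal_count_mountain_scenes := by
  intro N WIDTH HEIGHT hdom hpre
  unfold Spec_count_mountain_scenes
  unfold Pre_count_mountain_scenes at hpre
  simp only [count_mountain_scenes, count_mountain_scenes_alt]
  set R := min (HEIGHT * WIDTH) N with hR
  have hRle : R ≤ HEIGHT * WIDTH := min_le_left _ _
  set P := PySem.Int.floordiv R WIDTH + 1 with hP
  by_cases hRneg : R < 0
  · rw [if_pos hRneg, countA_f.eq_def, if_pos hRneg]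
    rw [PySem.Int.mod_eq_emod_of_pos (by norm_num), PySem.Int.mod_eq_emod_of_pos (by norm_num)]
    omega
  · rw [if_neg hRneg]
    push_neg at hRneg
    rcases lt_or_ge WIDTH 1 with hW | hW
    · have ht : WIDTH.toNat = 0 := by omega
      rw [ht, countA_f.eq_def, if_neg (by omega : ¬ R < 0), if_pos (by omega : 1 > WIDTH)]
      simp only [List.range_zero, List.foldl_nil, List.sum_cons, List.sum_replicate_int,
        mul_zero, add_zero]
      rw [PySem.Int.mod_eq_emod_of_pos (by norm_num), PySem.Int.mod_eq_emod_of_pos (by norm_num),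
        PySem.Int.mod_eq_emod_of_pos (by norm_num)]
      omega
    · have hH : 0 ≤ HEIGHT := by
        by_contra hneg
        push_neg at hneg
        have hlt : HEIGHT * WIDTH < 0 := mul_neg_of_neg_of_pos (by omega) (by omega)
        omega
      have hinv0 : InvA WIDTH HEIGHT
          (List.replicate (WIDTH + 1).toNat (List.replicate (R + 1).toNat (-1))) := by
        intro w r _ _ hne
        rw [pvGet2_replicate] at hne
        exact absurd rfl hne
      obtain ⟨hval, _⟩ := countA_f_spec WIDTH HEIGHT hH WIDTH.toNat 1 R _ (le_refl 1)
        (by omega) hinv0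
      rw [hval]
      have hk : (WIDTH + 1 - 1).toNat = WIDTH.toNat := by omega
      rw [hk]
      rw [ways0_eq HEIGHT R.toNat, fold_ways HEIGHT hH R.toNat WIDTH.toNat,
        sum_waysVec HEIGHT WIDTH.toNat R.toNat]
      have hcast : ((R.toNat : Nat) : Int) = R := by omega
      rw [hcast]
      rw [PySem.Int.mod_eq_emod_of_pos (by norm_num), PySem.Int.mod_eq_emod_of_pos (by norm_num)]
      omega
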